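-- pv_equiv track=rewrite | github.com/kristianwiklund/AOC | 2024/22/22.py | prsq
-- ===== SOURCE A (Python) =====
-- def sauce(n):
--
--     a=n
--     b=((64*a)^a)%16777216
--     c=((b//32)^b)%16777216
--     d=((c*2048)^c)%16777216
--
--     return d
--
-- def prsq(sn,cnt=2000):
--     meh=[]
--     p=sn%10
--     meh.append(p)
--
--     for i in range(cnt):
--         sn=sauce(sn)
--         meh.append(sn%10)
--     return meh
-- ===== SOURCE B (Python) =====
-- def sauce(n):
--
--     a=n
--     b=((64*a)^a)%16777216
--     c=((b//32)^b)%16777216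
--     d=((c*2048)^c)%16777216
--
--     return d
--
-- def prsq(sn, cnt=2000):
--     # Cycle detection: record each secret state's position; on the first repeat,
--     # fill the rest of the output by periodic indexing into the detected cycle.
--     tail = []
--     seen = {}
--     s = sauce(sn)
--     while len(tail) < cnt:
--         if s in seen:
--             i = seen[s]
--             cycle = tail[i:]
--             p = len(cycle)
--             need = cnt - len(tail)
--             tail.extend(cycle[k % p] for k in range(need))
--         else:
--             seen[s] = len(tail)
--             tail.append(s % 10)
--             s = sauce(s)
--     return [sn % 10] + tail
-- ===== Notes on version B (the rewrite author's own statement) =====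
-- stated objective: alternative
-- what changed: B replaces A's straight cnt-step simulation by hash-map cycle detection on the secret states: it records each state's first position in a dict, and on the first repeated state stops calling sauce and fills the rest of the output by periodic indexing into the detected cycle of digits.
import Mathlib
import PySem

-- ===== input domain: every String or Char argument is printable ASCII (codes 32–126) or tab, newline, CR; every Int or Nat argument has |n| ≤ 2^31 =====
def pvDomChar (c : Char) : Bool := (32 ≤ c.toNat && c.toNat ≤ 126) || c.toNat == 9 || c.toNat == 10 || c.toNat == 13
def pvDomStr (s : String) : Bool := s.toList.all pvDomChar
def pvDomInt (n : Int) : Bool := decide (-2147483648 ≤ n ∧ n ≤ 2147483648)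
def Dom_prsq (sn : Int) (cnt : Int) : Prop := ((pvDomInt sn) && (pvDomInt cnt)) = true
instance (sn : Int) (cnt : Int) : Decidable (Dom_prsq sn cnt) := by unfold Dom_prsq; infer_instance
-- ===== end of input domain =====

-- B replaces A's straight simulation loop by hash-map cycle detection on the secret states,
-- filling the remaining output by periodic indexing into the detected cycle (alternative algorithm).

-- ===== PORT A =====
def sauce (n : Int) : Int :=
  let a := n
  let b := PySem.Int.mod (PySem.Int.bxor (64 * a) a) 16777216
  let c := PySem.Int.mod (PySem.Int.bxor (PySem.Int.floordiv b 32) b) 16777216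
  let d := PySem.Int.mod (PySem.Int.bxor (c * 2048) c) 16777216
  d

def prsq (sn : Int) (cnt : Int) : List Int :=
  let meh : List Int := []
  let p := PySem.Int.mod sn 10
  let meh := meh ++ [p]
  let st := (PySem.List.pyRange 0 cnt 1).foldl
    (fun (st : Int × List Int) _ =>
      let sn := sauce st.1
      (sn, st.2 ++ [PySem.Int.mod sn 10])) (sn, meh)
  st.2

-- ===== PORT B =====
-- the while loop of Source B: state s, list tail of digits so far, dict seen : state → first index
def prsqLoop (cnt : Int) (s : Int) (tail : List Int) (seen : PySem.Dict Int Int) : List Int :=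
  if _h : (tail.length : Int) < cnt then
    match seen.get? s with
    | some i =>
      -- repeat found: Source B's cyc = tail[i:], p = len(cyc), need = cnt - len(tail) inlined;
      -- fill the rest from the cycle and return (the while condition then fails);
      -- cycle[k % p]: the index is always in range, so getD's default is never used
      tail ++ (PySem.List.pyRange 0 (cnt - (tail.length : Int)) 1).map
        (fun k => (PySem.List.slice tail (some i) none).getD
          (PySem.Int.mod k ((PySem.List.slice tail (some i) none).length : Int)).toNat 0)
    | none =>
      prsqLoop cnt (sauce s) (tail ++ [PySem.Int.mod s 10])
        (seen.insert s (tail.length : Int))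
  else tail
termination_by (cnt - (tail.length : Int)).toNat
decreasing_by simp only [List.length_append, List.length_singleton]; omega

def prsq_alt (sn : Int) (cnt : Int) : List Int :=
  [PySem.Int.mod sn 10] ++ prsqLoop cnt (sauce sn) [] PySem.Dict.empty

-- ===== PRECONDITION & SPEC =====
def Spec_prsq (sn : Int) (cnt : Int) (out : List Int) : Prop := out = prsq_alt sn cnt
instance (sn : Int) (cnt : Int) (out : List Int) : Decidable (Spec_prsq sn cnt out) := by unfold Spec_prsq; infer_instance

-- ===== CLAIM (what is proved, stated in full; the proofs are below) =====
def Claim_equal_prsq : Prop := ∀ (sn : Int) (cnt : Int), Dom_prsq sn cnt → Spec_prsq sn cnt (prsq sn cnt)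

-- ===== LEMMAS AND PROOFS =====

-- the stream of m last digits starting at secret s
def dstream (s : Int) : Nat → List Int
  | 0 => []
  | n+1 => PySem.Int.mod s 10 :: dstream (sauce s) n

theorem dstream_eq_map (m : Nat) (s : Int) :
    dstream s m = (List.range m).map (fun k => PySem.Int.mod (sauce^[k] s) 10) := by
  induction m generalizing s with
  | zero => simp [dstream]
  | succ n ih =>
    rw [dstream, ih, List.range_succ_eq_map]
    simp [List.map_map, Function.comp_def, Function.iterate_succ_apply]

theorem dstream_succ_append (j : Nat) (s : Int) :
    dstream s (j+1) = dstream s j ++ [PySem.Int.mod (sauce^[j] s) 10] := by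
  rw [dstream_eq_map, dstream_eq_map, List.range_succ]
  simp

theorem iterate_mod {x : Int} {p : Nat} (hp : 0 < p) (hx : sauce^[p] x = x) :
    ∀ k, sauce^[k] x = sauce^[k % p] x := by
  intro k
  induction k using Nat.strong_induction_on with
  | _ k ih =>
    by_cases hk : k < p
    · rw [Nat.mod_eq_of_lt hk]
    · have h2 : sauce^[k] x = sauce^[k - p] x := by
        calc sauce^[k] x = sauce^[(k - p) + p] x := by rw [Nat.sub_add_cancel (by omega)]
          _ = sauce^[k - p] (sauce^[p] x) := Function.iterate_add_apply _ _ _ _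
          _ = sauce^[k - p] x := by rw [hx]
      rw [h2, ih (k - p) (by omega)]
      congr 1
      exact (Nat.mod_eq_sub_mod (by omega)).symm

theorem foldl_loop_eq (l : List Int) (sn : Int) (acc : List Int) :
    (l.foldl (fun (st : Int × List Int) _ =>
        let s := sauce st.1
        (s, st.2 ++ [PySem.Int.mod s 10])) (sn, acc)).2
      = acc ++ dstream (sauce sn) l.length := by
  induction l generalizing sn acc with
  | nil => simp [dstream]
  | cons x xs ih => rw [List.foldl_cons, ih]; simp [dstream]

theorem prsqLoop_eq (cnt s0 : Int) :
    ∀ (fuel j : Nat) (tail : List Int) (seen : PySem.Dict Int Int),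
    fuel = (cnt - (j : Int)).toNat →
    tail = dstream s0 j →
    tail.length = j →
    (∀ x i, seen.get? x = some i → ∃ k : Nat, i = (k : Int) ∧ k < j ∧ x = sauce^[k] s0) →
    prsqLoop cnt (sauce^[j] s0) tail seen = tail ++ dstream (sauce^[j] s0) fuel := by
  intro fuel
  induction fuel with
  | zero =>
    intro j tail seen hfuel htail hlen hseen
    rw [prsqLoop, dif_neg (by omega)]
    simp [dstream]
  | succ m ih =>
    intro j tail seen hfuel htail hlen hseen
    have hlt : (tail.length : Int) < cnt := by omega
    rw [prsqLoop, dif_pos hlt]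
    cases hg : seen.get? (sauce^[j] s0) with
    | none =>
      -- fresh state: record it and continue
      have hrec := ih (j+1) (tail ++ [PySem.Int.mod (sauce^[j] s0) 10])
        (seen.insert (sauce^[j] s0) (tail.length : Int))
        (by push_cast; omega)
        (by rw [htail, ← dstream_succ_append])
        (by simp [hlen])
        (by
          intro x i hx
          rw [PySem.Dict.get?_insert] at hx
          split_ifs at hx with hxe
          · exact ⟨j, by simpa [hlen] using hx.symm, by omega, by rw [hxe]⟩
          · obtain ⟨k, hk1, hk2, hk3⟩ := hseen x i hx
            exact ⟨k, hk1, by omega, hk3⟩)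
      rw [Function.iterate_succ_apply'] at hrec
      dsimp only
      rw [hrec, dstream]
      simp
    | some i =>
      -- repeat found at index k < j: the digit stream from sauce^[k] s0 is periodic
      obtain ⟨k, hik, hkj, hxk⟩ := hseen _ i hg
      subst hik
      have hp : 0 < j - k := by omega
      set x := sauce^[j] s0 with hxdef
      have hfix : sauce^[j - k] x = x := by
        have : (j - k) + k = j := by omega
        calc sauce^[j - k] x = sauce^[j - k] (sauce^[k] s0) := by rw [← hxk]
        _ = sauce^[(j - k) + k] s0 := (Function.iterate_add_apply _ _ _ _).symm
        _ = x := by rw [this]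
      -- the slice and fill
      dsimp only
      rw [PySem.List.slice_from_natCast]
      have hcyclen : (tail.drop k).length = j - k := by simp [hlen]
      have hneed : (cnt - (tail.length : Int)) = ((m + 1 : Nat) : Int) := by
        push_cast; omega
      rw [hneed, PySem.List.pyRange_one, List.map_map]
      congr 1
      rw [dstream_eq_map]
      simp only [Int.sub_zero, Int.toNat_natCast]
      apply List.map_congr_left
      intro q hq
      simp only [Function.comp_def, Int.zero_add, PySem.Int.mod_natCast, hcyclen,
        Int.toNat_natCast]
      -- LHS: (tail.drop k).getD (q % (j-k)) 0 = digit of sauce^[k + q % (j-k)] s0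
      have hqlt : q % (j - k) < j - k := Nat.mod_lt _ hp
      have hidx : k + q % (j - k) < j := by omega
      have hL : (tail.drop k).getD (q % (j - k)) 0
          = PySem.Int.mod (sauce^[k + q % (j - k)] s0) 10 := by
        rw [List.getD_eq_getElem?_getD, List.getElem?_drop, htail, dstream_eq_map]
        rw [List.getElem?_map, List.getElem?_range hidx]
        rfl
      rw [hL]
      -- RHS: sauce^[q] x = sauce^[q % (j-k)] x = sauce^[k + q % (j-k)] s0
      rw [iterate_mod hp hfix q, hxk, ← Function.iterate_add_apply, Nat.add_comm]

-- ===== VERDICT (by name: the statement is the Claim_ definition above) =====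
theorem prsq_spec : Claim_equal_prsq := by
  intro sn cnt _
  show prsq sn cnt = prsq_alt sn cnt
  unfold prsq prsq_alt
  rw [foldl_loop_eq, PySem.List.length_pyRange_one]
  have h := prsqLoop_eq cnt (sauce sn) (cnt - (0:Int)).toNat 0 [] PySem.Dict.empty
    rfl rfl rfl (by intro x i hx; simp [PySem.Dict.get?_empty] at hx)
  simp only [Function.iterate_zero_apply] at h
  simp only [Int.sub_zero] at h ⊢
  rw [h]
  simp
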